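-- pv_equiv track=rewrite | github.com/ksj1368/Algorithm | 프로그래머스/2/70129. 이진 변환 반복하기/이진 변환 반복하기.py | solution
-- ===== SOURCE A (Python) =====
-- def solution(s):
--     zero_cnt = 0
--     trans = 0
--
--     while True:
--         zero_cnt += s.count("0")
--         s = "".join(s.split("0"))
--         s = str(format(len(s), 'b'))
--         trans += 1
--         if s == "1":
--             return trans, zero_cnt
-- ===== SOURCE B (Python) =====
-- def solution(s):
--     ones = sum(1 for c in s if c != '0')
--     zero_cnt = len(s) - ones
--     trans = 1
--     while ones != 1:
--         bits = ones
--         p = 0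
--         b = 0
--         while bits:
--             p += bits & 1
--             b += 1
--             bits >>= 1
--         zero_cnt += b - p
--         ones = p
--         trans += 1
--     return trans, zero_cnt
-- ===== Notes on version B (the rewrite author's own statement) =====
-- stated objective: alternative
-- what changed: B replaces A's per-round string rebuilding (count/split/join/format on strings) with pure integer bookkeeping: it tracks the count of non-'0' characters and per round computes the bit-length and popcount of that integer by shifting, never materialising a binary string.
import Mathlib
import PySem

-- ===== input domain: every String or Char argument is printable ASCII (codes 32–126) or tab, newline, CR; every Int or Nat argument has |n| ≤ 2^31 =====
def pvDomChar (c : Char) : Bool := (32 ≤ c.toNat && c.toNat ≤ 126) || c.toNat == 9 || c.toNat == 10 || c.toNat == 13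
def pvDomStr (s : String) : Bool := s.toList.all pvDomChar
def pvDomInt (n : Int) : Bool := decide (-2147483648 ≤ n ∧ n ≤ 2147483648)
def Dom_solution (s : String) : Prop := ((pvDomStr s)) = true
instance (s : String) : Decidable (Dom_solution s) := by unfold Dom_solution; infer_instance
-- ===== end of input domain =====

-- B replaces A's per-round string split/join/format bookkeeping with integer popcount/bit-length
-- arithmetic on the count of non-'0' characters (objective: alternative, same cost).


-- ===== PORT A =====
-- c != '0'  (named so both ports share the exact predicate)
def isNotZero (c : Char) : Bool := c ≠ '0'

-- format(n,'b'): binary digits of n, most significant first ("" for n = 0; toBin adds the '0' case)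
def binGo (n : Nat) : List Char :=
  if n = 0 then []
  else binGo (n / 2) ++ [if n % 2 = 1 then '1' else '0']
decreasing_by exact Nat.div_lt_self (Nat.pos_of_ne_zero (by assumption)) (by norm_num)

def toBin (n : Nat) : List Char := if n = 0 then ['0'] else binGo n

-- A's while-True loop; fuel is only a totality guard (never exhausted under Pre_).
def solutionLoop (fuel : Nat) (s : List Char) (zero trans : Int) : Int × Int :=
  match fuel with
  | 0 => (trans, zero)
  | fuel + 1 =>
    let zero := zero + (s.count '0' : Int)          -- zero_cnt += s.count("0")
    let s := s.filter isNotZero                     -- s = "".join(s.split("0")) removes every '0'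
    let s := toBin s.length                         -- s = str(format(len(s), 'b'))
    let trans := trans + 1                          -- trans += 1
    if s = ['1'] then (trans, zero)                 -- if s == "1": return trans, zero_cnt
    else solutionLoop fuel s zero trans

def solution (s : String) : Int × Int :=
  solutionLoop (s.toList.length + 1) s.toList 0 0

-- ===== PORT B =====
-- inner while of Source B: returns (p, b) = (popcount, number of bits shifted) of its argument
def pb (n : Nat) : Nat × Nat :=
  if n = 0 then (0, 0)
  else
    let q := pb (n / 2)
    (q.1 + n % 2, q.2 + 1)
decreasing_by exact Nat.div_lt_self (Nat.pos_of_ne_zero (by assumption)) (by norm_num)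

theorem pb_fst_le (n : Nat) : (pb n).1 ≤ n := by
  induction n using Nat.strong_induction_on with
  | _ n ih =>
    rw [pb]
    split
    · simp [*]
    · rename_i h
      have h1 : n / 2 < n := Nat.div_lt_self (Nat.pos_of_ne_zero h) (by norm_num)
      have := ih (n / 2) h1
      simp only []
      omega

theorem pb_fst_lt (n : Nat) (h : 2 ≤ n) : (pb n).1 < n := by
  rw [pb]
  have h0 : ¬ n = 0 := by omega
  have := pb_fst_le (n / 2)
  simp only [h0, if_false]
  omega

-- outer while of Source B; the `ones ≤ 1` guard only totalises `ones ≠ 1` (ones = 0 lies outside Pre_)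
def altLoop (ones : Nat) (zero trans : Int) : Int × Int :=
  if h : ones ≤ 1 then (trans, zero)
  else
    let q := pb ones
    altLoop q.1 (zero + ((q.2 : Int) - (q.1 : Int))) (trans + 1)
termination_by ones
decreasing_by exact pb_fst_lt ones (by omega)

def solution_alt (s : String) : Int × Int :=
  let ones := (s.toList.filter isNotZero).length            -- sum(1 for c in s if c != '0')
  let zero := (s.toList.length : Int) - (ones : Int)        -- len(s) - ones
  altLoop ones zero 1

-- ===== PRECONDITION & SPEC =====
-- Pre_ excludes exactly the strings whose characters are all '0' (including ""), on which
-- Python A loops forever (and Python B does too).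
def Pre_solution (s : String) : Prop := s.toList.any (fun c => c ≠ '0') = true
instance (s : String) : Decidable (Pre_solution s) := by unfold Pre_solution; infer_instance

def pvWitness_solution : String := "110010"

def Spec_solution (s : String) (out : Int × Int) : Prop := out = solution_alt s
instance (s : String) (out : Int × Int) : Decidable (Spec_solution s out) := by unfold Spec_solution; infer_instance

-- ===== CLAIM (what is proved, stated in full; the proofs are below) =====
def Claim_equal_solution : Prop := ∀ (s : String), Dom_solution s → Pre_solution s → Spec_solution s (solution s)

-- ===== LEMMAS AND PROOFS =====

theorem binGo_zero : binGo 0 = [] := by rw [binGo]; simp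

theorem toBin_one : toBin 1 = ['1'] := by
  rw [toBin]
  norm_num
  rw [binGo]
  norm_num [binGo_zero]

theorem binGo_ne_nil (n : Nat) (h : 1 ≤ n) : binGo n ≠ [] := by
  rw [binGo]
  have h0 : ¬ n = 0 := by omega
  simp [h0]

-- binGo n = "1" iff n = 1
theorem binGo_eq_one (n : Nat) (h : 1 ≤ n) : binGo n = ['1'] ↔ n = 1 := by
  constructor
  · intro he
    by_contra hne
    have h2 : 2 ≤ n := by omega
    have h1 : 1 ≤ n / 2 := by omega
    have hne2 := binGo_ne_nil (n / 2) h1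
    rw [binGo] at he
    have h0 : ¬ n = 0 := by omega
    simp only [h0, if_false] at he
    rcases List.exists_cons_of_ne_nil hne2 with ⟨a, l, hl⟩
    rw [hl] at he
    cases l <;> simp at he
  · intro he
    subst he
    rw [binGo]
    norm_num [binGo_zero]

theorem toBin_ne_one (n : Nat) (h : 2 ≤ n) : ¬ (toBin n = ['1']) := by
  rw [toBin]
  have h0 : ¬ n = 0 := by omega
  simp only [h0, if_false]
  intro hco
  have := (binGo_eq_one n (by omega)).mp hco
  omega

-- count of '0' and popcount add up to the bit count, and the non-'0' characters number popcount
theorem binGo_counts (n : Nat) :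
    (binGo n).count '0' + (pb n).1 = (pb n).2 ∧
    ((binGo n).filter isNotZero).length = (pb n).1 := by
  induction n using Nat.strong_induction_on with
  | _ n ih =>
    by_cases h0 : n = 0
    · subst h0; rw [binGo, pb]; simp
    · have h1 : n / 2 < n := Nat.div_lt_self (Nat.pos_of_ne_zero h0) (by norm_num)
      obtain ⟨ih1, ih2⟩ := ih (n / 2) h1
      rw [binGo, pb]
      simp only [h0, if_false]
      by_cases hm : n % 2 = 1
      · rw [if_pos hm]
        simp only [List.count_append, List.filter_append, List.length_append]
        have e1 : List.count '0' ['1'] = 0 := by decide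
        have e2 : List.filter isNotZero ['1'] = ['1'] := by decide
        rw [e1, e2]
        simp only [List.length_cons, List.length_nil]
        omega
      · rw [if_neg hm]
        simp only [List.count_append, List.filter_append, List.length_append]
        have e1 : List.count '0' ['0'] = 1 := by decide
        have e2 : List.filter isNotZero ['0'] = [] := by decide
        rw [e1, e2]
        simp only [List.length_nil]
        omega

theorem toBin_counts (n : Nat) (h : 1 ≤ n) :
    (toBin n).count '0' + (pb n).1 = (pb n).2 ∧
    ((toBin n).filter isNotZero).length = (pb n).1 := by
  have h0 : ¬ n = 0 := by omega
  rw [toBin]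
  simp only [h0, if_false]
  exact binGo_counts n

theorem pb_fst_pos (n : Nat) (h : 1 ≤ n) : 1 ≤ (pb n).1 := by
  induction n using Nat.strong_induction_on with
  | _ n ih =>
    rw [pb]
    have h0 : ¬ n = 0 := by omega
    simp only [h0, if_false]
    by_cases h1 : n = 1
    · subst h1; norm_num
    · have h2 : 1 ≤ n / 2 := by omega
      have := ih (n / 2) (Nat.div_lt_self (by omega) (by norm_num)) h2
      omega

-- the main invariant: A's loop, started on the binary string of n ≥ 1, computes B's loop
theorem loop_eq (fuel : Nat) : ∀ n zero trans, 1 ≤ n → n ≤ fuel →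
    solutionLoop fuel (toBin n) zero trans
      = altLoop (pb n).1 (zero + ((pb n).2 - (pb n).1 : Int)) (trans + 1) := by
  induction fuel with
  | zero => intro n _ _ h1 h2; omega
  | succ fuel ih =>
    intro n zero trans h1 hle
    obtain ⟨hc, hf⟩ := toBin_counts n h1
    have hp1 := pb_fst_pos n h1
    rw [solutionLoop]
    simp only [hf]
    by_cases hm : (pb n).1 = 1
    · rw [hm, toBin_one]
      rw [if_pos rfl]
      rw [altLoop.eq_def]
      rw [dif_pos (by norm_num : (1 : Nat) ≤ 1)]
      simp only [Prod.mk.injEq]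
      exact ⟨trivial, by omega⟩
    · have h2 : 2 ≤ (pb n).1 := by omega
      have hne := toBin_ne_one (pb n).1 h2
      rw [if_neg hne]
      have hn2 : 2 ≤ n := le_trans h2 (pb_fst_le n)
      have hlt : (pb n).1 < n := pb_fst_lt n hn2
      have hz : ((toBin n).count '0' : Int) = ((pb n).2 : Int) - ((pb n).1 : Int) := by omega
      rw [hz]
      have hgt : ¬ (pb n).1 ≤ 1 := by omega
      conv_rhs => rw [altLoop.eq_def]
      rw [dif_neg hgt]
      rw [ih (pb n).1 _ _ (by omega) (by omega)]

-- count '0' + number of non-'0' characters = length, for an arbitrary list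
theorem count0_filter (l : List Char) :
    l.count '0' + (l.filter isNotZero).length = l.length := by
  induction l with
  | nil => simp
  | cons a l ih =>
    by_cases h : a = '0' <;>
      simp [h, isNotZero] <;> omega

theorem pre_ones_pos (l : List Char) (h : l.any (fun c => c ≠ '0') = true) :
    1 ≤ (l.filter isNotZero).length := by
  obtain ⟨c, hc, hne⟩ := List.any_eq_true.mp h
  have : c ∈ l.filter isNotZero := by
    simp_all [List.mem_filter, isNotZero]
  exact List.length_pos_of_mem this

-- ===== VERDICT (by name: the statement is the Claim_ definition above) =====
theorem solution_spec : Claim_equal_solution := by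
  intro s _ hpre
  unfold Spec_solution
  have hones := pre_ones_pos s.toList hpre
  have hcf := count0_filter s.toList
  have hA : solution s = solutionLoop (s.toList.length + 1) s.toList 0 0 := rfl
  have hB : solution_alt s
      = altLoop ((s.toList.filter isNotZero).length)
          ((s.toList.length : Int) - (((s.toList.filter isNotZero).length : Nat) : Int)) 1 := rfl
  rw [hA, hB, solutionLoop]
  by_cases h1 : (s.toList.filter isNotZero).length = 1
  · rw [h1, toBin_one]
    rw [if_pos rfl]
    rw [altLoop.eq_def]
    rw [dif_pos (by norm_num : (1 : Nat) ≤ 1)]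
    simp only [Prod.mk.injEq]
    exact ⟨by norm_num, by omega⟩
  · have h2 : 2 ≤ (s.toList.filter isNotZero).length := by omega
    have hne := toBin_ne_one _ h2
    rw [if_neg hne]
    have hlen : (s.toList.filter isNotZero).length ≤ s.toList.length :=
      List.length_filter_le _ _
    have hz : (0 : Int) + ((s.toList.count '0' : Nat) : Int)
        = (s.toList.length : Int) - (((s.toList.filter isNotZero).length : Nat) : Int) := by
      omega
    have ht : (0 : Int) + 1 = 1 := by norm_num
    rw [hz, ht]
    have hgt : ¬ (s.toList.filter isNotZero).length ≤ 1 := by omega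
    conv_rhs => rw [altLoop.eq_def]
    rw [dif_neg hgt]
    rw [loop_eq s.toList.length _ _ _ (by omega) hlen]
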